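-- pv_equiv track=rewrite | github.com/patrobert27/basic-analysis-Lists-Dictionaries- | parsing.py | duplicate_name_hire
-- ===== SOURCE A (Python) =====
-- def duplicate_name_hire(rows: list[dict]) -> set[str]:
--     seen: set[tuple[str, str]] = set()
--     duplicate_ids: set[str] = set()
--
--     for row in rows:
--         # if exsist -> return value
--         # else -> return None "", for don't obtain a error
--         name = (row.get("name") or "").strip()
--         hire_date = (row.get("hire_date") or "").strip()
--         employee_id = (row.get("employee_id") or "").strip()
--
--         key = (name, hire_date)
--
--         if key in seen:
--             # este es un duplicado (segunda vez o más)
--             if employee_id: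
--                 duplicate_ids.add(employee_id)
--         else:
--             seen.add(key)
--
--     return duplicate_ids
-- ===== SOURCE B (Python) =====
-- def duplicate_name_hire(rows: list[dict]) -> set[str]:
--     # Two staged passes instead of A's streaming seen-set:
--     # pass 1 records each (name, hire_date) key's FIRST row index;
--     # pass 2 keeps every truthy employee_id of a row strictly after
--     # its key's first occurrence.
--     norm = [((r.get("name") or "").strip(),
--              (r.get("hire_date") or "").strip(),
--              (r.get("employee_id") or "").strip()) for r in rows]
--     first: dict[tuple[str, str], int] = {}
--     for i, (name, hire_date, _eid) in enumerate(norm):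
--         first.setdefault((name, hire_date), i)
--     out: set[str] = set()
--     for i, (name, hire_date, eid) in enumerate(norm):
--         if eid and first[(name, hire_date)] < i:
--             out.add(eid)
--     return out
-- ===== Notes on version B (the rewrite author's own statement) =====
-- stated objective: alternative
-- what changed: Replaces A's single streaming pass with a mutable seen-set by two staged passes: an index pass recording each (name, hire_date) key's first row index via setdefault, then a selection pass adding every truthy employee_id whose row index is strictly after its key's first occurrence.
import Mathlib
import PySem

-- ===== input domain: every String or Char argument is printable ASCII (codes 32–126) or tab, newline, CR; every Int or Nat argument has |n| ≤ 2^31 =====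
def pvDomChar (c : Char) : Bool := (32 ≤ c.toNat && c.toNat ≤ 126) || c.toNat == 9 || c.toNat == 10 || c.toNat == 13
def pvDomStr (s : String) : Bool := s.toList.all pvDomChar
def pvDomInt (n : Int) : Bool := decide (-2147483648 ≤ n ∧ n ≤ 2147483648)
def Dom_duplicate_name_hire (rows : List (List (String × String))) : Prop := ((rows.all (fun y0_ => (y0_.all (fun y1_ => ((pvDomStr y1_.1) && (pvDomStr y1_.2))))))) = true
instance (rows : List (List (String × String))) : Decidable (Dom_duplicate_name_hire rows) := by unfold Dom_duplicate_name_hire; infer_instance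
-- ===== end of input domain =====

-- B replaces A's streaming seen-set pass by two staged passes: a first-occurrence
-- index dict, then a selection pass (alternative decomposition, not claimed faster).

-- ===== PORT A =====
def duplicate_name_hire (rows : List (List (String × String))) : List String :=
  (rows.foldl (fun (st : PySem.Set (String × String) × PySem.Set String) row =>
      let name := PySem.Str.strip (PySem.Dict.getD (PySem.Dict.mk row) "name" "")
      let hire_date := PySem.Str.strip (PySem.Dict.getD (PySem.Dict.mk row) "hire_date" "")
      let employee_id := PySem.Str.strip (PySem.Dict.getD (PySem.Dict.mk row) "employee_id" "")
      let key := (name, hire_date)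
      if PySem.Set.contains st.1 key then
        (st.1, if employee_id ≠ "" then PySem.Set.add st.2 employee_id else st.2)
      else
        (PySem.Set.add st.1 key, st.2))
    (PySem.Set.empty, PySem.Set.empty)).2

-- ===== PORT B =====
-- normalised triple (name, hire_date, employee_id) of one row, as in Source B's comprehension
def pvNormRow (row : List (String × String)) : String × String × String :=
  (PySem.Str.strip (PySem.Dict.getD (PySem.Dict.mk row) "name" ""),
   PySem.Str.strip (PySem.Dict.getD (PySem.Dict.mk row) "hire_date" ""),
   PySem.Str.strip (PySem.Dict.getD (PySem.Dict.mk row) "employee_id" ""))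

-- pass-1 body: first.setdefault((name, hire_date), i)
def pvSetdefaultStep (d : PySem.Dict (String × String) Int)
    (p : Int × String × String × String) : PySem.Dict (String × String) Int :=
  PySem.Dict.setdefault d (p.2.1, p.2.2.1) p.1

-- the test first[(name, hire_date)] < i (the none branch is unreachable:
-- every key of norm is a key of first)
def pvHit (first : PySem.Dict (String × String) Int) (i : Int) (k : String × String) : Bool :=
  match PySem.Dict.get? first k with
  | some j => decide (j < i)
  | none => false

def duplicate_name_hire_alt (rows : List (List (String × String))) : List String :=
  let norm := rows.map pvNormRow
  let first := (PySem.List.enumerate norm).foldl pvSetdefaultStep PySem.Dict.empty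
  (PySem.List.enumerate norm).foldl (fun (out : PySem.Set String) p =>
      if p.2.2.2 ≠ "" ∧ pvHit first p.1 (p.2.1, p.2.2.1) = true then
        PySem.Set.add out p.2.2.2
      else out)
    PySem.Set.empty

-- ===== PRECONDITION & SPEC =====
def Spec_duplicate_name_hire (rows : List (List (String × String))) (out : List String) : Prop := out = duplicate_name_hire_alt rows
instance (rows : List (List (String × String))) (out : List String) : Decidable (Spec_duplicate_name_hire rows out) := by unfold Spec_duplicate_name_hire; infer_instance

-- ===== CLAIM (what is proved, stated in full; the proofs are below) =====
def Claim_equal_duplicate_name_hire : Prop := ∀ (rows : List (List (String × String))), Dom_duplicate_name_hire rows → Spec_duplicate_name_hire rows (duplicate_name_hire rows)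

-- ===== LEMMAS AND PROOFS =====

-- the (name, hire_date) key of a normalised triple
def pvKey (t : String × String × String) : String × String := (t.1, t.2.1)

-- A's loop body, expressed on the normalised triple
def pvStepA (st : PySem.Set (String × String) × PySem.Set String)
    (t : String × String × String) : PySem.Set (String × String) × PySem.Set String :=
  if PySem.Set.contains st.1 (pvKey t) then
    (st.1, if t.2.2 ≠ "" then PySem.Set.add st.2 t.2.2 else st.2)
  else
    (PySem.Set.add st.1 (pvKey t), st.2)

-- reference recursion: ks = keys of the rows already processed
def pvSpec (ks : List (String × String)) (ts : List (String × String × String))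
    (out : PySem.Set String) : PySem.Set String :=
  match ts with
  | [] => out
  | t :: ts' =>
      pvSpec (ks ++ [pvKey t]) ts'
        (if t.2.2 ≠ "" ∧ pvKey t ∈ ks then PySem.Set.add out t.2.2 else out)

lemma pvA_spec : ∀ (ts : List (String × String × String)) (ks : List (String × String))
    (seen : PySem.Set (String × String)) (out : PySem.Set String),
    (∀ k, k ∈ seen ↔ k ∈ ks) →
    (ts.foldl pvStepA (seen, out)).2 = pvSpec ks ts out := by
  intro ts
  induction ts with
  | nil => intro ks seen out _; rfl
  | cons t ts ih =>
    intro ks seen out hinv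
    simp only [List.foldl_cons, pvSpec]
    by_cases hk : pvKey t ∈ ks
    · have hc : PySem.Set.contains seen (pvKey t) = true :=
        (PySem.Set.contains_iff seen (pvKey t)).mpr ((hinv _).mpr hk)
      rw [show pvStepA (seen, out) t
            = (seen, if t.2.2 ≠ "" then PySem.Set.add out t.2.2 else out) by
          simp only [pvStepA, hc]; rfl]
      rw [ih (ks ++ [pvKey t]) seen _ (by
        intro k; rw [hinv k]
        simp only [List.mem_append, List.mem_singleton]
        constructor
        · exact Or.inl
        · rintro (h | rfl)
          · exact h
          · exact hk)]
      congr 1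
      by_cases he : t.2.2 ≠ "" <;> simp [he, hk]
    · have hc : PySem.Set.contains seen (pvKey t) = false := by
        cases h : PySem.Set.contains seen (pvKey t)
        · rfl
        · exact absurd ((hinv _).mp ((PySem.Set.contains_iff _ _).mp h)) hk
      rw [show pvStepA (seen, out) t = (PySem.Set.add seen (pvKey t), out) by
          simp only [pvStepA, hc]; rfl]
      rw [ih (ks ++ [pvKey t]) _ _ (by
        intro k
        rw [PySem.Set.mem_add, hinv k]
        simp only [List.mem_append, List.mem_singleton])]
      rw [if_neg (fun h => hk h.2)]

-- index of the first triple with key k in ts, indices starting at s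
def pvFirstIdx (k : String × String) : List (String × String × String) → Int → Option Int
  | [], _ => none
  | t :: ts, s => if pvKey t = k then some s else pvFirstIdx k ts (s + 1)

-- pass 1 computes exactly pvFirstIdx on top of the initial dict
lemma pvBuild_get : ∀ (ts : List (String × String × String)) (s : Int)
    (d : PySem.Dict (String × String) Int) (k : String × String),
    (PySem.Dict.get? ((PySem.List.enumerate ts s).foldl pvSetdefaultStep d) k)
      = (match PySem.Dict.get? d k with
         | some v => some v
         | none => pvFirstIdx k ts s) := by
  intro ts
  induction ts with
  | nil =>
    intro s d k
    cases h : PySem.Dict.get? d k <;> simp [PySem.List.enumerate_nil, pvFirstIdx, h]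
  | cons t ts ih =>
    intro s d k
    rw [PySem.List.enumerate_cons, List.foldl_cons, ih]
    rw [show pvSetdefaultStep d (s, t) = PySem.Dict.setdefault d (pvKey t) s from rfl]
    by_cases hc : PySem.Dict.contains d (pvKey t) = true
    · have hd : PySem.Dict.setdefault d (pvKey t) s = d := PySem.Dict.setdefault_of_contains _ _ hc
      rw [hd]
      cases h : PySem.Dict.get? d k with
      | some v => simp
      | none =>
        have hne : pvKey t ≠ k := by
          intro he
          rw [PySem.Dict.contains_eq_isSome_get?, he, h] at hc
          simp at hc
        simp [pvFirstIdx, hne]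
    · have hc' : PySem.Dict.contains d (pvKey t) = false := by
        cases h : PySem.Dict.contains d (pvKey t)
        · rfl
        · exact absurd h hc
      have hd : PySem.Dict.setdefault d (pvKey t) s = PySem.Dict.insert d (pvKey t) s :=
        PySem.Dict.setdefault_of_not_contains _ _ hc'
      rw [hd]
      by_cases he : k = pvKey t
      · have h0 : PySem.Dict.get? d (pvKey t) = none := by
          rw [PySem.Dict.contains_eq_isSome_get?] at hc'
          cases h : PySem.Dict.get? d (pvKey t)
          · rfl
          · rw [h] at hc'; simp at hc'
        subst he
        simp [PySem.Dict.get?_insert_self, h0, pvFirstIdx]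
      · rw [PySem.Dict.get?_insert, if_neg he]
        cases h : PySem.Dict.get? d k with
        | some v => simp
        | none =>
          have hne : ¬ (pvKey t = k) := fun hh => he hh.symm
          simp [pvFirstIdx, hne]

lemma pvFirstIdx_mem (k : String × String) :
    ∀ (pre rest : List (String × String × String)) (s : Int),
    k ∈ pre.map pvKey →
    ∃ j, pvFirstIdx k (pre ++ rest) s = some j ∧ j < s + pre.length := by
  intro pre
  induction pre with
  | nil => intro rest s h; simp at h
  | cons t pre ih =>
    intro rest s h
    by_cases he : pvKey t = k
    · exact ⟨s, by simp [pvFirstIdx, he],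
        lt_add_of_pos_right s (Int.natCast_pos.mpr (Nat.succ_pos pre.length))⟩
    · have h' : k ∈ pre.map pvKey := by
        simp only [List.map_cons, List.mem_cons] at h
        rcases h with h | h
        · exact absurd h.symm he
        · exact h
      obtain ⟨j, hj, hlt⟩ := ih rest (s + 1) h'
      refine ⟨j, by simpa [pvFirstIdx, he] using hj, ?_⟩
      simp only [List.length_cons] at hlt ⊢
      push_cast at hlt ⊢
      omega

lemma pvFirstIdx_notmem (k : String × String) :
    ∀ (pre : List (String × String × String)) (t : String × String × String)
      (ts : List (String × String × String)) (s : Int),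
    k ∉ pre.map pvKey → pvKey t = k →
    pvFirstIdx k (pre ++ t :: ts) s = some (s + pre.length) := by
  intro pre
  induction pre with
  | nil => intro t ts s _ ht; simp [pvFirstIdx, ht]
  | cons u pre ih =>
    intro t ts s h ht
    have hu : pvKey u ≠ k := fun he => h (by simp [he])
    have h' : k ∉ pre.map pvKey := fun hm => h (by simp [hm])
    rw [List.cons_append,
        show pvFirstIdx k (u :: (pre ++ t :: ts)) s = pvFirstIdx k (pre ++ t :: ts) (s + 1) by
          simp [pvFirstIdx, hu],
        ih t ts (s + 1) h' ht]
    congr 1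
    simp only [List.length_cons]
    push_cast
    omega

-- the selection pass computes pvSpec
lemma pvB_spec (norm : List (String × String × String)) :
    ∀ (rest pre : List (String × String × String)) (out : PySem.Set String),
    norm = pre ++ rest →
    (PySem.List.enumerate rest ((pre.length : Nat) : Int)).foldl
      (fun (out : PySem.Set String) p =>
        if p.2.2.2 ≠ "" ∧ pvHit ((PySem.List.enumerate norm).foldl pvSetdefaultStep PySem.Dict.empty)
              p.1 (p.2.1, p.2.2.1) = true then
          PySem.Set.add out p.2.2.2
        else out) out
      = pvSpec (pre.map pvKey) rest out := by
  intro rest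
  induction rest with
  | nil => intro pre out _; rfl
  | cons t ts ih =>
    intro pre out hpre
    rw [PySem.List.enumerate_cons, List.foldl_cons]
    have hget : PySem.Dict.get? ((PySem.List.enumerate norm).foldl pvSetdefaultStep PySem.Dict.empty)
          (pvKey t) = pvFirstIdx (pvKey t) norm 0 := by
      rw [show PySem.List.enumerate norm = PySem.List.enumerate norm 0 from rfl, pvBuild_get]
      simp [PySem.Dict.get?_empty]
    have hcond : pvHit ((PySem.List.enumerate norm).foldl pvSetdefaultStep PySem.Dict.empty)
          ((pre.length : Nat) : Int) (t.1, t.2.1)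
          = decide (pvKey t ∈ pre.map pvKey) := by
      unfold pvHit
      rw [show ((t.1 : String), t.2.1) = pvKey t from rfl, hget]
      by_cases hm : pvKey t ∈ pre.map pvKey
      · obtain ⟨j, hj, hlt⟩ := pvFirstIdx_mem (pvKey t) pre (t :: ts) 0 hm
        rw [hpre, hj]
        simp only [zero_add] at hlt
        simp [hlt, hm]
      · rw [hpre, pvFirstIdx_notmem (pvKey t) pre t ts 0 hm rfl]
        simp [hm]
    rw [show (if t.2.2 ≠ "" ∧ pvHit ((PySem.List.enumerate norm).foldl pvSetdefaultStep PySem.Dict.empty)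
              ((pre.length : Nat) : Int) (t.1, t.2.1) = true then PySem.Set.add out t.2.2 else out)
        = (if t.2.2 ≠ "" ∧ pvKey t ∈ pre.map pvKey then PySem.Set.add out t.2.2 else out) by
      rw [hcond]; simp only [decide_eq_true_eq]]
    rw [show ((pre.length : Nat) : Int) + 1 = (((pre ++ [t]).length : Nat) : Int) by simp]
    rw [show pvSpec (pre.map pvKey) (t :: ts) out
          = pvSpec ((pre ++ [t]).map pvKey) ts
              (if t.2.2 ≠ "" ∧ pvKey t ∈ pre.map pvKey then PySem.Set.add out t.2.2 else out) by
        rw [show (pre ++ [t]).map pvKey = pre.map pvKey ++ [pvKey t] by simp]; rfl]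
    exact ih (pre ++ [t]) _ (by rw [hpre]; simp)

-- ===== VERDICT (by name: the statement is the Claim_ definition above) =====
theorem duplicate_name_hire_spec : Claim_equal_duplicate_name_hire := by
  intro rows _
  unfold Spec_duplicate_name_hire
  have hA : duplicate_name_hire rows
      = ((rows.map pvNormRow).foldl pvStepA (PySem.Set.empty, PySem.Set.empty)).2 := by
    rw [List.foldl_map]; rfl
  have hB : duplicate_name_hire_alt rows
      = (PySem.List.enumerate (rows.map pvNormRow)
          ((((([] : List (String × String × String))).length : Nat)) : Int)).foldl
          (fun (out : PySem.Set String) p =>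
            if p.2.2.2 ≠ "" ∧ pvHit ((PySem.List.enumerate (rows.map pvNormRow)).foldl
                  pvSetdefaultStep PySem.Dict.empty) p.1 (p.2.1, p.2.2.1) = true then
              PySem.Set.add out p.2.2.2
            else out) PySem.Set.empty := rfl
  rw [hA, hB, pvB_spec (rows.map pvNormRow) (rows.map pvNormRow) [] PySem.Set.empty (by simp)]
  exact pvA_spec (rows.map pvNormRow) [] _ _ (by intro k; simp [PySem.Set.empty])
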